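-- pv_equiv track=rewrite | github.com/FREAK-lang-dev/freak-editors | vscode/freak-lang/freak_lsp.py | _word_at
-- ===== SOURCE A (Python) =====
-- def _word_at(line: str, col: int) -> str:
--     """Extract the word at column position."""
--     if col >= len(line):
--         col = len(line) - 1
--     if col < 0:
--         return ""
--     # Find word boundaries
--     start = col
--     while start > 0 and (line[start - 1].isalnum() or line[start - 1] == '_'):
--         start -= 1
--     end = col
--     while end < len(line) and (line[end].isalnum() or line[end] == '_'):
--         end += 1
--     return line[start:end]
-- ===== SOURCE B (Python) =====
-- def _take_word(chars: str) -> str: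
--     """Longest prefix of chars made of identifier characters."""
--     out = []
--     for ch in chars:
--         if ch.isalnum() or ch == '_':
--             out.append(ch)
--         else:
--             break
--     return ''.join(out)
--
--
-- def _word_at(line: str, col: int) -> str:
--     """Extract the word at column position."""
--     if col >= len(line):
--         col = len(line) - 1
--     if col < 0:
--         return ""
--     before = _take_word(line[:col][::-1])[::-1]
--     after = _take_word(line[col:])
--     return before + after
-- ===== Notes on version B (the rewrite author's own statement) =====
-- stated objective: simpler
-- what changed: Replaces A's two index-stepping while loops and slice arithmetic by a list decomposition: split the line at the (clamped) cursor, take the identifier-character prefix of the reversed left part and of the right part, and concatenate.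
import Mathlib
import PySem

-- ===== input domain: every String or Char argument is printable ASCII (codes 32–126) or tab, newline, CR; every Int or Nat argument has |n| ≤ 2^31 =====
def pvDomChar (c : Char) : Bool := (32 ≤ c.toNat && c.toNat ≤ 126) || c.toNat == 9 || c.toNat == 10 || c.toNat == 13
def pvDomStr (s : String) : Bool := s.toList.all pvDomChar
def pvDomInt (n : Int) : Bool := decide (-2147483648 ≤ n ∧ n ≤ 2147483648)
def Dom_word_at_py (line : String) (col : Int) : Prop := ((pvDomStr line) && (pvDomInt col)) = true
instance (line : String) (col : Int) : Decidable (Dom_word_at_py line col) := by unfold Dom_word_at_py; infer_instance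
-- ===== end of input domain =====

-- B replaces A's two index-stepping while loops by list decomposition: take/reverse
-- around the cursor plus a single prefix-scan helper (objective: simpler decomposition).

-- the Python test `ch.isalnum() or ch == '_'`, shared by both ports
def pvIsWord (ch : Char) : Bool := PySem.Chars.isalnum ch || ch == '_'

-- ===== PORT A =====
-- `while start > 0 and (line[start-1].isalnum() or line[start-1] == '_'): start -= 1`
def wa_scanLeft (chars : List Char) : Nat → Nat
  | 0 => 0
  | s + 1 => if pvIsWord (chars.getD s ' ') then wa_scanLeft chars s else s + 1

-- `while end < len(line) and (line[end].isalnum() or line[end] == '_'): end += 1`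
def wa_scanRight (chars : List Char) (e : Nat) : Nat :=
  if h : e < chars.length then
    if pvIsWord chars[e] then wa_scanRight chars (e + 1) else e
  else e
termination_by chars.length - e

def word_at_py (line : String) (col : Int) : String :=
  let chars := line.toList
  let col := if col ≥ (chars.length : Int) then (chars.length : Int) - 1 else col
  if col < 0 then ""
  else
    let start := wa_scanLeft chars col.toNat
    let stop := wa_scanRight chars col.toNat
    String.ofList (PySem.List.slice chars (some (start : Int)) (some (stop : Int)))

-- ===== PORT B =====
-- Source B's `_take_word`: loop with break over the characters
def wb_takeWord : List Char → List Char
  | [] => []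
  | ch :: rest => if pvIsWord ch then ch :: wb_takeWord rest else []

def word_at_py_alt (line : String) (col : Int) : String :=
  let chars := line.toList
  let col := if col ≥ (chars.length : Int) then (chars.length : Int) - 1 else col
  if col < 0 then ""
  else
    let before := (wb_takeWord ((chars.take col.toNat).reverse)).reverse
    let after := wb_takeWord (chars.drop col.toNat)
    String.ofList (before ++ after)

-- ===== PRECONDITION & SPEC =====
def Spec_word_at_py (line : String) (col : Int) (out : String) : Prop := out = word_at_py_alt line col
instance (line : String) (col : Int) (out : String) : Decidable (Spec_word_at_py line col out) := by unfold Spec_word_at_py; infer_instance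

-- ===== CLAIM (what is proved, stated in full; the proofs are below) =====
def Claim_equal_word_at_py : Prop := ∀ (line : String) (col : Int), Dom_word_at_py line col → Spec_word_at_py line col (word_at_py line col)

-- ===== LEMMAS AND PROOFS =====

theorem le_wa_scanRight (chars : List Char) (c : Nat) : c ≤ wa_scanRight chars c := by
  unfold wa_scanRight
  split
  · split
    · have := le_wa_scanRight chars (c + 1); omega
    · exact le_refl c
  · exact le_refl c
termination_by chars.length - c

theorem wa_scanLeft_le (chars : List Char) (c : Nat) : wa_scanLeft chars c ≤ c := by
  induction c with
  | zero => simp [wa_scanLeft]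
  | succ s ih =>
    rw [wa_scanLeft]
    split
    · omega
    · exact le_refl _

theorem takeWord_drop (chars : List Char) (c : Nat) :
    (chars.drop c).take (wa_scanRight chars c - c) = wb_takeWord (chars.drop c) := by
  by_cases h : c < chars.length
  · have hd : chars.drop c = chars[c] :: chars.drop (c + 1) := List.drop_eq_getElem_cons h
    rw [wa_scanRight]
    simp only [h, dif_pos]
    by_cases hw : pvIsWord chars[c]
    · rw [if_pos hw, hd]
      have hle := le_wa_scanRight chars (c + 1)
      have : wa_scanRight chars (c + 1) - c = (wa_scanRight chars (c + 1) - (c + 1)) + 1 := by omega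
      rw [this, List.take_succ_cons, wb_takeWord, if_pos hw]
      have := takeWord_drop chars (c + 1)
      rw [this]
    · rw [if_neg hw, hd, Nat.sub_self, List.take_zero, wb_takeWord, if_neg hw]
  · have : chars.drop c = [] := List.drop_eq_nil_of_le (by omega)
    rw [this]
    simp [wb_takeWord]
termination_by chars.length - c

theorem takeWord_take (chars : List Char) :
    ∀ c, c ≤ chars.length →
      (chars.take c).drop (wa_scanLeft chars c) =
        (wb_takeWord ((chars.take c).reverse)).reverse := by
  intro c
  induction c with
  | zero => intro _; simp [wa_scanLeft, wb_takeWord]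
  | succ s ih =>
    intro hc
    have hs : s < chars.length := by omega
    have htake : chars.take (s + 1) = chars.take s ++ [chars[s]] := by
      rw [List.take_add_one]
      simp [List.getElem?_eq_getElem hs]
    have hgd : chars.getD s ' ' = chars[s] := List.getD_eq_getElem chars ' ' hs
    rw [wa_scanLeft, hgd, htake, List.reverse_append]
    simp only [List.reverse_cons, List.reverse_nil, List.nil_append, List.singleton_append]
    by_cases hw : pvIsWord chars[s]
    · rw [if_pos hw, wb_takeWord, if_pos hw, List.reverse_cons]
      rw [List.drop_append_of_le_length]
      · rw [ih (by omega)]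
      · rw [List.length_take]; have := wa_scanLeft_le chars s; omega
    · rw [if_neg hw, wb_takeWord, if_neg hw, List.reverse_nil]
      apply List.drop_eq_nil_of_le
      simp only [List.length_append, List.length_take, List.length_singleton]
      omega

theorem slice_split (chars : List Char) (s c e : Nat)
    (hsc : s ≤ c) (hce : c ≤ e) (hcn : c ≤ chars.length) :
    (chars.drop s).take (e - s) =
      (chars.take c).drop s ++ (chars.drop c).take (e - c) := by
  have hlen : ((chars.take c).drop s).length = c - s := by
    rw [List.length_drop, List.length_take]; omega
  have hsplit : chars.drop s = (chars.take c).drop s ++ chars.drop c := by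
    conv_lhs => rw [← List.take_append_drop c chars]
    exact List.drop_append_of_le_length (by rw [List.length_take]; omega)
  rw [hsplit, List.take_append, hlen, List.take_of_length_le (by rw [hlen]; omega)]
  have he : e - s - (c - s) = e - c := by omega
  rw [he]

theorem main_case (chars : List Char) (ci : Int) (h0 : 0 ≤ ci)
    (hlt : ci < (chars.length : Int)) :
    String.ofList (PySem.List.slice chars (some ((wa_scanLeft chars ci.toNat : Nat) : Int))
        (some ((wa_scanRight chars ci.toNat : Nat) : Int))) =
      String.ofList ((wb_takeWord ((chars.take ci.toNat).reverse)).reverse ++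
        wb_takeWord (chars.drop ci.toNat)) := by
  have hcn : ci.toNat ≤ chars.length := by omega
  congr 1
  rw [PySem.List.slice_natCast,
    slice_split chars _ ci.toNat _ (wa_scanLeft_le chars ci.toNat)
      (le_wa_scanRight chars ci.toNat) hcn,
    takeWord_take chars ci.toNat hcn, takeWord_drop chars ci.toNat]

-- ===== VERDICT (by name: the statement is the Claim_ definition above) =====
theorem word_at_py_spec : Claim_equal_word_at_py := by
  unfold Claim_equal_word_at_py Spec_word_at_py
  intro line col _
  simp only [word_at_py, word_at_py_alt, ge_iff_le]
  by_cases h : (line.toList.length : Int) ≤ col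
  · simp only [if_pos h]
    by_cases hneg : (line.toList.length : Int) - 1 < 0
    · simp only [if_pos hneg]
    · simp only [if_neg hneg]
      exact main_case _ _ (by omega) (by omega)
  · simp only [if_neg h]
    by_cases hneg : col < 0
    · simp only [if_pos hneg]
    · simp only [if_neg hneg]
      exact main_case _ _ (by omega) (by omega)
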